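-- pv_equiv track=rewrite | github.com/MrLotU/AdventOfCode2023 | solutions/14.py | calc_load
-- ===== SOURCE A (Python) =====
-- def calc_load(cols):
--     total_height = len(cols[0])
--     total_load = 0
--
--     for col in cols:
--         col_load = 0
--         block_idx = -1
--         for idx, object in enumerate(col):
--             if object == '#':
--                 block_idx = idx
--             elif object == 'O':
--                 block_idx += 1
--                 col_load += total_height - block_idx
--
--         total_load += col_load
--     return total_load
-- ===== SOURCE B (Python) =====
-- def split_on_hash(col):
--     segs = []
--     cur = []
--     for x in col:
--         if x == '#':
--             segs.append(cur)
--             cur = []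
--         else:
--             cur.append(x)
--     segs.append(cur)
--     return segs
--
--
-- def calc_load(cols):
--     total_height = len(cols[0])
--     total_load = 0
--     for col in cols:
--         offset = 0
--         for seg in split_on_hash(col):
--             c = seg.count('O')
--             total_load += c * total_height - c * offset - c * (c - 1) // 2
--             offset += len(seg) + 1
--     return total_load
-- ===== Notes on version B (the rewrite author's own statement) =====
-- stated objective: alternative
-- what changed: B splits each column on '#' into segments and adds a per-segment closed-form load c*H - c*offset - c*(c-1)//2 instead of A's per-rock running block index and increment.
-- outside the precondition, e.g. on calc_load([]): A raises IndexError, B raises IndexError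
import Mathlib
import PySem

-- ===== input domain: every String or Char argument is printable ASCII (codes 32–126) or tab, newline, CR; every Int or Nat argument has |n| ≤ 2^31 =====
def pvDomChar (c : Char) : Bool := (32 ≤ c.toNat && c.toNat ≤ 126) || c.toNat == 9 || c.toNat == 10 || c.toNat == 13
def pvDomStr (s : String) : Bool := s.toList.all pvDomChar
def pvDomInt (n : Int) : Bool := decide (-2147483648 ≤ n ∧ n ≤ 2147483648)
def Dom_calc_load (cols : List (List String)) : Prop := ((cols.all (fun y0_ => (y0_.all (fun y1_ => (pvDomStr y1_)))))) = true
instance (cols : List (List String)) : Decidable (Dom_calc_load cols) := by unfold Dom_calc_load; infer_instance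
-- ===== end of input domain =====

-- B replaces A's per-rock running counter with a split of each column on '#' and a
-- per-segment closed-form load (objective: alternative decomposition, same cost).

-- ===== PORT A =====
def calc_load (cols : List (List String)) : Int :=
  let total_height : Int := ((PySem.List.pyGet? cols 0).getD []).length
  cols.foldl (fun total_load col =>
    let s := (PySem.List.enumerate col).foldl
      (fun (st : Int × Int) (p : Int × String) =>
        if p.2 = "#" then (st.1, p.1)
        else if p.2 = "O" then (st.1 + (total_height - (st.2 + 1)), st.2 + 1)
        else st)
      (0, -1)
    total_load + s.1) 0

-- ===== PORT B =====
def splitOnHash (col : List String) : List (List String) :=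
  let s := col.foldl
    (fun (st : List (List String) × List String) x =>
      if x = "#" then (st.1 ++ [st.2], []) else (st.1, st.2 ++ [x]))
    ([], [])
  s.1 ++ [s.2]

def calc_load_alt (cols : List (List String)) : Int :=
  let total_height : Int := ((PySem.List.pyGet? cols 0).getD []).length
  cols.foldl (fun total_load col =>
    ((splitOnHash col).foldl
      (fun (st : Int × Int) seg =>
        let c : Int := PySem.List.count seg "O"
        (st.1 + (c * total_height - c * st.2 - PySem.Int.floordiv (c * (c - 1)) 2),
         st.2 + seg.length + 1))
      (total_load, 0)).1) 0

-- ===== PRECONDITION & SPEC =====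
-- Pre_ excludes only the empty list, on which Python A raises IndexError (cols[0]).
def Pre_calc_load (cols : List (List String)) : Prop := cols ≠ []
instance (cols : List (List String)) : Decidable (Pre_calc_load cols) := by
  unfold Pre_calc_load; infer_instance

def pvWitness_calc_load : List (List String) := [["O", ".", "#", "O"], [".", "O", ".", "."]]

def Spec_calc_load (cols : List (List String)) (out : Int) : Prop := out = calc_load_alt cols
instance (cols : List (List String)) (out : Int) : Decidable (Spec_calc_load cols out) := by
  unfold Spec_calc_load; infer_instance

-- ===== CLAIM (what is proved, stated in full; the proofs are below) =====
def Claim_equal_calc_load : Prop := ∀ (cols : List (List String)), Dom_calc_load cols → Pre_calc_load cols → Spec_calc_load cols (calc_load cols)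

-- ===== LEMMAS AND PROOFS =====

-- recursive restatement of A's inner loop
def aRec (H : Int) : List String → Int → Int → Int
  | [], _, _ => 0
  | x :: xs, idx, bi =>
    if x = "#" then aRec H xs (idx + 1) idx
    else if x = "O" then (H - (bi + 1)) + aRec H xs (idx + 1) (bi + 1)
    else aRec H xs (idx + 1) bi

-- head-style split on "#"
def hsplit : List String → List (List String)
  | [] => [[]]
  | x :: xs =>
    if x = "#" then [] :: hsplit xs
    else
      match hsplit xs with
      | [] => [[x]]
      | h :: t => (x :: h) :: t

def consHead (cur : List String) : List (List String) → List (List String)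
  | [] => [cur]
  | h :: t => (cur ++ h) :: t

def closedSeg (H : Int) (seg : List String) (off : Int) : Int :=
  let c : Int := PySem.List.count seg "O"
  c * H - c * off - PySem.Int.floordiv (c * (c - 1)) 2

def bRec (H : Int) : List (List String) → Int → Int
  | [], _ => 0
  | s :: r, off => closedSeg H s off + bRec H r (off + s.length + 1)

theorem hsplit_ne_nil (xs : List String) : hsplit xs ≠ [] := by
  cases xs with
  | nil => simp [hsplit]
  | cons x xs =>
    simp only [hsplit]
    split
    · simp
    · cases h : hsplit xs <;> simp

theorem aRec_foldl (H : Int) (col : List String) :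
    ∀ (idx bi load : Int),
      ((PySem.List.enumerate col idx).foldl
        (fun (st : Int × Int) (p : Int × String) =>
          if p.2 = "#" then (st.1, p.1)
          else if p.2 = "O" then (st.1 + (H - (st.2 + 1)), st.2 + 1)
          else st)
        (load, bi)).1 = load + aRec H col idx bi := by
  induction col with
  | nil => intro idx bi load; simp [PySem.List.enumerate_nil, aRec]
  | cons x xs ih =>
    intro idx bi load
    rw [PySem.List.enumerate_cons]
    simp only [List.foldl_cons, aRec]
    by_cases h1 : x = "#"
    · simp [h1, ih]
    · by_cases h2 : x = "O"
      · simp [h1, h2, ih]; ring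
      · simp [h1, h2, ih]

theorem bRec_foldl (H : Int) (segs : List (List String)) :
    ∀ (off total : Int),
      (segs.foldl
        (fun (st : Int × Int) seg =>
          let c : Int := PySem.List.count seg "O"
          (st.1 + (c * H - c * st.2 - PySem.Int.floordiv (c * (c - 1)) 2),
           st.2 + seg.length + 1))
        (total, off)).1 = total + bRec H segs off := by
  induction segs with
  | nil => intro off total; simp [bRec]
  | cons s r ih =>
    intro off total
    simp only [List.foldl_cons, bRec, closedSeg, ih]
    ring

theorem split_foldl (col : List String) :
    ∀ (segs : List (List String)) (cur : List String),
      (let s := col.foldl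
        (fun (st : List (List String) × List String) x =>
          if x = "#" then (st.1 ++ [st.2], []) else (st.1, st.2 ++ [x]))
        (segs, cur)
       s.1 ++ [s.2]) = segs ++ consHead cur (hsplit col) := by
  induction col with
  | nil => intro segs cur; simp [consHead, hsplit]
  | cons x xs ih =>
    intro segs cur
    simp only [List.foldl_cons, hsplit]
    by_cases h1 : x = "#"
    · simp only [h1, if_pos rfl, ih]
      cases h : hsplit xs with
      | nil => exact absurd h (hsplit_ne_nil xs)
      | cons a t => simp [consHead]
    · simp only [if_neg h1, ih]
      cases h : hsplit xs with
      | nil => exact absurd h (hsplit_ne_nil xs)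
      | cons a t => simp [consHead]

theorem splitOnHash_eq (col : List String) : splitOnHash col = hsplit col := by
  have h := split_foldl col [] []
  cases hc : hsplit col with
  | nil => exact absurd hc (hsplit_ne_nil col)
  | cons a t =>
    rw [hc] at h
    simpa [splitOnHash, consHead] using h

theorem floordiv_succ (c : Int) :
    PySem.Int.floordiv ((c + 1) * c) 2 = PySem.Int.floordiv (c * (c - 1)) 2 + c := by
  obtain ⟨k, hk⟩ : Even (c * (c - 1)) := by
    rcases Int.even_or_odd c with h | h
    · exact h.mul_right _
    · obtain ⟨m, hm⟩ := h
      exact Int.even_mul.mpr (Or.inr ⟨m, by omega⟩)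
  have h1 : c * (c - 1) = 2 * k := by omega
  have e1 : c * (c - 1) = c * c - c := by ring
  have e2 : (c + 1) * c = c * c + c := by ring
  have h2 : (c + 1) * c = 2 * (k + c) := by rw [e2]; rw [e1] at h1; linarith
  rw [h1, h2]
  rw [PySem.Int.floordiv_eq_ediv_of_pos (by omega), PySem.Int.floordiv_eq_ediv_of_pos (by omega)]
  omega

theorem closedSeg_nil (H off : Int) : closedSeg H [] off = 0 := by
  simp [closedSeg, PySem.List.count, PySem.Int.floordiv]

theorem closedSeg_cons_O (H off : Int) (s : List String) :
    closedSeg H ("O" :: s) off = (H - off) + closedSeg H s (off + 1) := by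
  simp only [closedSeg, PySem.List.count_eq]
  have hc : (List.count "O" ("O" :: s) : Int) = (List.count "O" s : Int) + 1 := by
    simp [List.count_cons]
  rw [hc]
  have := floordiv_succ ((List.count "O" s : Int))
  have e1 : ((List.count "O" s : Int) + 1) * ((List.count "O" s : Int) + 1 - 1)
      = ((List.count "O" s : Int) + 1) * (List.count "O" s : Int) := by ring
  rw [e1, this]
  ring

theorem closedSeg_cons_other (H off : Int) (x : String) (s : List String) (hx : x ≠ "O") :
    closedSeg H (x :: s) off = closedSeg H s off := by
  simp only [closedSeg, PySem.List.count_eq]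
  have : List.count "O" (x :: s) = List.count "O" s := by
    simp [List.count_cons, hx]
  rw [this]

-- A's loop over a hash-free prefix produces the closed-form segment load
theorem aRec_seg (H : Int) (s : List String) (hs : "#" ∉ s) :
    ∀ (xs : List String) (idx off : Int),
      aRec H (s ++ xs) idx (off - 1)
        = closedSeg H s off
          + aRec H xs (idx + s.length) (off + PySem.List.count s "O" - 1) := by
  induction s with
  | nil =>
    intro xs idx off
    simp [closedSeg_nil, PySem.List.count]
  | cons x s ih =>
    intro xs idx off
    have hx : x ≠ "#" := fun h => hs (h ▸ List.mem_cons_self)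
    have hs' : "#" ∉ s := fun h => hs (List.mem_cons_of_mem _ h)
    by_cases hO : x = "O"
    · subst hO
      have estep : aRec H (("O" :: s) ++ xs) idx (off - 1)
          = (H - off) + aRec H (s ++ xs) (idx + 1) ((off + 1) - 1) := by
        simp [aRec]
      rw [estep, ih hs' xs (idx + 1) (off + 1), closedSeg_cons_O]
      have hcnt : PySem.List.count ("O" :: s) "O" = PySem.List.count s "O" + 1 := by
        simp [PySem.List.count_eq, List.count_cons]
      rw [hcnt]
      have eA : aRec H xs (idx + 1 + (s.length : Int))
            (off + 1 + (PySem.List.count s "O" : Int) - 1)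
          = aRec H xs (idx + (("O" :: s).length : Int))
            (off + ((PySem.List.count s "O" : Int) + 1) - 1) := by
        congr 1 <;> (try simp only [List.length_cons]) <;> (try push_cast) <;> ring
      rw [eA]
      push_cast
      ring
    · have estep : aRec H ((x :: s) ++ xs) idx (off - 1)
          = aRec H (s ++ xs) (idx + 1) (off - 1) := by
        simp [aRec, hx, hO]
      rw [estep, ih hs' xs (idx + 1) off, closedSeg_cons_other H off x s hO]
      have hcnt : PySem.List.count (x :: s) "O" = PySem.List.count s "O" := by
        simp [PySem.List.count_eq, List.count_cons, hO]
      rw [hcnt]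
      have eA : aRec H xs (idx + 1 + (s.length : Int))
            (off + (PySem.List.count s "O" : Int) - 1)
          = aRec H xs (idx + ((x :: s).length : Int))
            (off + (PySem.List.count s "O" : Int) - 1) := by
        congr 1 <;> (try simp only [List.length_cons]) <;> (try push_cast) <;> ring
      rw [eA]

theorem hsplit_no_hash (col : List String) (h : "#" ∉ col) : hsplit col = [col] := by
  induction col with
  | nil => simp [hsplit]
  | cons x xs ih =>
    have hx : x ≠ "#" := fun hh => h (hh ▸ List.mem_cons_self)
    have h' : "#" ∉ xs := fun hh => h (List.mem_cons_of_mem _ hh)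
    simp only [hsplit, if_neg hx, ih h']

theorem hsplit_decomp (s : List String) (hs : "#" ∉ s) (rest : List String) :
    hsplit (s ++ "#" :: rest) = s :: hsplit rest := by
  induction s with
  | nil => simp [hsplit]
  | cons x s ih =>
    have hx : x ≠ "#" := fun h => hs (h ▸ List.mem_cons_self)
    have hs' : "#" ∉ s := fun h => hs (List.mem_cons_of_mem _ h)
    simp only [List.cons_append, hsplit, if_neg hx, ih hs']

theorem exists_decomp (col : List String) (h : "#" ∈ col) :
    ∃ s rest, col = s ++ "#" :: rest ∧ "#" ∉ s := by
  induction col with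
  | nil => simp at h
  | cons x xs ih =>
    by_cases hx : x = "#"
    · exact ⟨[], xs, by simp [hx], by simp⟩
    · have : "#" ∈ xs := by
        rcases List.mem_cons.mp h with h1 | h1
        · exact absurd h1.symm hx
        · exact h1
      obtain ⟨s, rest, heq, hns⟩ := ih this
      exact ⟨x :: s, rest, by simp [heq], by
        intro hm
        rcases List.mem_cons.mp hm with h1 | h1
        · exact hx h1.symm
        · exact hns h1⟩

theorem aRec_eq_bRec (H : Int) :
    ∀ (n : Nat) (col : List String), col.length ≤ n →
      ∀ (idx : Int), aRec H col idx (idx - 1) = bRec H (hsplit col) idx := by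
  intro n
  induction n with
  | zero =>
    intro col hlen idx
    have : col = [] := List.length_eq_zero_iff.mp (Nat.le_zero.mp hlen)
    subst this
    simp [aRec, hsplit, bRec, closedSeg_nil]
  | succ n ih =>
    intro col hlen idx
    by_cases h : "#" ∈ col
    · obtain ⟨s, rest, heq, hns⟩ := exists_decomp col h
      subst heq
      rw [hsplit_decomp s hns rest]
      rw [aRec_seg H s hns ("#" :: rest) idx idx]
      have hrest : rest.length ≤ n := by
        have := hlen
        simp [List.length_append] at this
        omega
      have estep : aRec H ("#" :: rest) (idx + (s.length : Int))
            (idx + (PySem.List.count s "O" : Int) - 1)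
          = aRec H rest (idx + (s.length : Int) + 1) ((idx + (s.length : Int) + 1) - 1) := by
        simp [aRec]
      rw [estep, ih rest hrest (idx + s.length + 1)]
      simp [bRec]
    · rw [hsplit_no_hash col h]
      have := aRec_seg H col h [] idx idx
      simp only [List.append_nil, aRec] at this
      rw [this]
      simp [bRec, closedSeg_nil]

theorem percol_eq (H : Int) (col : List String) :
    ((PySem.List.enumerate col).foldl
      (fun (st : Int × Int) (p : Int × String) =>
        if p.2 = "#" then (st.1, p.1)
        else if p.2 = "O" then (st.1 + (H - (st.2 + 1)), st.2 + 1)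
        else st)
      (0, -1)).1
    = bRec H (hsplit col) 0 := by
  rw [aRec_foldl H col 0 (-1) 0]
  have := aRec_eq_bRec H col.length col (le_refl _) 0
  norm_num at this ⊢
  exact this

theorem main_fold (H : Int) (cols : List (List String)) :
    ∀ (t : Int),
      cols.foldl (fun total_load col =>
        let s := (PySem.List.enumerate col).foldl
          (fun (st : Int × Int) (p : Int × String) =>
            if p.2 = "#" then (st.1, p.1)
            else if p.2 = "O" then (st.1 + (H - (st.2 + 1)), st.2 + 1)
            else st)
          (0, -1)
        total_load + s.1) t
      = cols.foldl (fun total_load col =>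
        ((splitOnHash col).foldl
          (fun (st : Int × Int) seg =>
            let c : Int := PySem.List.count seg "O"
            (st.1 + (c * H - c * st.2 - PySem.Int.floordiv (c * (c - 1)) 2),
             st.2 + seg.length + 1))
          (total_load, 0)).1) t := by
  induction cols with
  | nil => intro t; rfl
  | cons col rest ih =>
    intro t
    simp only [List.foldl_cons]
    rw [percol_eq H col, bRec_foldl H (splitOnHash col) 0 t, splitOnHash_eq]
    exact ih (t + bRec H (hsplit col) 0)

-- ===== VERDICT (by name: the statement is the Claim_ definition above) =====
theorem calc_load_spec : Claim_equal_calc_load := by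
  intro cols _ _
  unfold Spec_calc_load calc_load calc_load_alt
  exact main_fold _ cols 0
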